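-- pv_equiv track=rewrite | github.com/Serebrennikovi/session-archive | session_archive.backup.2026-03-27.py | _dedupe_messages
-- ===== SOURCE A (Python) =====
-- def _dedupe_messages(messages):
--     seen = set()
--     result = []
--     for msg in sorted(messages, key=lambda m: ((m.get("timestamp") or ""), m.get("role") or "", m.get("text") or "")):
--         key = (msg.get("timestamp"), msg.get("role"), msg.get("text"))
--         if key in seen:
--             continue
--         seen.add(key)
--         result.append(msg)
--     return result
-- ===== SOURCE B (Python) =====
-- def _dedupe_messages(messages):
--     result = []
--     remaining = list(messages)
--     while remaining:
--         first = remaining[0]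
--         k = (first.get("timestamp"), first.get("role"), first.get("text"))
--         result.append(first)
--         remaining = [m for m in remaining[1:]
--                      if (m.get("timestamp"), m.get("role"), m.get("text")) != k]
--     return sorted(
--         result,
--         key=lambda m: (m.get("timestamp") or "", m.get("role") or "", m.get("text") or ""),
--     )
-- ===== Notes on version B (the rewrite author's own statement) =====
-- stated objective: alternative
-- what changed: A sorts the whole list first and then scans it once keeping a seen-set of raw key tuples; B never uses a set: it peels off the first remaining message and filters all later messages with the same raw key out of the worklist (keep-first dedup by repeated filtering), then sorts only the surviving unique messages, relying on sort stability for the tie order.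
import Mathlib
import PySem

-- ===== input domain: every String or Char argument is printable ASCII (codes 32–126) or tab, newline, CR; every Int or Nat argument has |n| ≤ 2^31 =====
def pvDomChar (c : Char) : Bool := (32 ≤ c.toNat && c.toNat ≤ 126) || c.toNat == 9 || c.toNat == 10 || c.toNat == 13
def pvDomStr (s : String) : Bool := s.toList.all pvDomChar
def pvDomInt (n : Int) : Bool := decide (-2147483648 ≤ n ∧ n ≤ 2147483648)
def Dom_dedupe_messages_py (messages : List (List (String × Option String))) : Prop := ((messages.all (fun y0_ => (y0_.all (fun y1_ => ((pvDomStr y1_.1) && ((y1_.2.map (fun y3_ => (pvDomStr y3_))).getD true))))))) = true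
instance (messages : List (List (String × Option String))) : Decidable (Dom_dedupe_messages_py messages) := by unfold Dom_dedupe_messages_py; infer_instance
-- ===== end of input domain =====

-- B replaces A's sort-then-scan-with-seen-set by a set-free worklist dedup: it repeatedly
-- takes the first remaining message and filters every later message with the same raw key
-- out of the worklist, then sorts only the unique survivors; objective: alternative.

-- ===== PORT A =====
-- m.get(k): first-match lookup in the association list; a stored None and a missing key both give none
def pvGet (m : List (String × Option String)) (k : String) : Option String :=
  (List.find? (fun p => p.1 == k) m).bind (fun p => p.2)

-- key = (msg.get("timestamp"), msg.get("role"), msg.get("text"))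
def pvRawKey (m : List (String × Option String)) : Option String × Option String × Option String :=
  (pvGet m "timestamp", pvGet m "role", pvGet m "text")

-- sort key (m.get("timestamp") or "", m.get("role") or "", m.get("text") or ""); Python's
-- tuple-of-str comparison is lexicographic = Lean's '<' on List (List Char)
def pvSortKey (m : List (String × Option String)) : List (List Char) :=
  [((pvGet m "timestamp").getD "").toList, ((pvGet m "role").getD "").toList, ((pvGet m "text").getD "").toList]

def dedupe_messages_py (messages : List (List (String × Option String))) : List (List (String × Option String)) :=
  ((PySem.List.sorted messages pvSortKey).foldl
    (fun (st : PySem.Set (Option String × Option String × Option String) × List (List (String × Option String))) msg =>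
      if PySem.Set.contains st.1 (pvRawKey msg) then st
      else (PySem.Set.add st.1 (pvRawKey msg), st.2 ++ [msg]))
    (PySem.Set.empty, [])).2

-- ===== PORT B =====
-- the `while remaining:` loop of Source B: pop the head, drop its raw-key duplicates from the worklist
def pvWorklist (result remaining : List (List (String × Option String))) : List (List (String × Option String)) :=
  match remaining with
  | [] => result
  | first :: rest =>
      pvWorklist (result ++ [first]) (rest.filter (fun m => decide (pvRawKey m ≠ pvRawKey first)))
termination_by remaining.length
decreasing_by
  simp only [List.length_unattach, List.length_cons, Nat.lt_succ_iff]
  exact le_trans (List.length_filter_le _ _) (by simp)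

def dedupe_messages_py_alt (messages : List (List (String × Option String))) : List (List (String × Option String)) :=
  PySem.List.sorted (pvWorklist [] messages) pvSortKey

-- ===== PRECONDITION & SPEC =====
def Spec_dedupe_messages_py (messages : List (List (String × Option String))) (out : List (List (String × Option String))) : Prop := out = dedupe_messages_py_alt messages
instance (messages : List (List (String × Option String))) (out : List (List (String × Option String))) : Decidable (Spec_dedupe_messages_py messages out) := by unfold Spec_dedupe_messages_py; infer_instance

-- ===== CLAIM (what is proved, stated in full; the proofs are below) =====
def Claim_equal_dedupe_messages_py : Prop := ∀ (messages : List (List (String × Option String))), Dom_dedupe_messages_py messages → Spec_dedupe_messages_py messages (dedupe_messages_py messages)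

-- ===== LEMMAS AND PROOFS =====

-- keep-first dedup by pvRawKey, with an explicit list of already-seen keys
def pvDD : List (List (String × Option String)) → List (Option String × Option String × Option String) → List (List (String × Option String))
  | [], _ => []
  | m :: t, seen => if pvRawKey m ∈ seen then pvDD t seen else m :: pvDD t (pvRawKey m :: seen)

theorem pvDD_nil (s : List (Option String × Option String × Option String)) : pvDD [] s = [] := rfl

theorem pvDD_cons (m : List (String × Option String)) (t : List (List (String × Option String)))
    (s : List (Option String × Option String × Option String)) :
    pvDD (m :: t) s = if pvRawKey m ∈ s then pvDD t s else m :: pvDD t (pvRawKey m :: s) := rfl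

theorem pvSortKey_eq_of_rawKey_eq {a b : List (String × Option String)}
    (h : pvRawKey a = pvRawKey b) : pvSortKey a = pvSortKey b :=
  calc pvSortKey a
      = [((pvRawKey a).1.getD "").toList, ((pvRawKey a).2.1.getD "").toList, ((pvRawKey a).2.2.getD "").toList] := rfl
    _ = [((pvRawKey b).1.getD "").toList, ((pvRawKey b).2.1.getD "").toList, ((pvRawKey b).2.2.getD "").toList] := by rw [h]
    _ = pvSortKey b := rfl

theorem pvDD_congr (l : List (List (String × Option String))) (s s' : List (Option String × Option String × Option String))
    (h : ∀ m ∈ l, (pvRawKey m ∈ s ↔ pvRawKey m ∈ s')) : pvDD l s = pvDD l s' := by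
  induction l generalizing s s' with
  | nil => rfl
  | cons m t ih =>
    have hm := h m (List.mem_cons_self ..)
    by_cases hmem : pvRawKey m ∈ s
    · rw [pvDD_cons, pvDD_cons, if_pos hmem, if_pos (hm.mp hmem)]
      exact ih s s' (fun x hx => h x (List.mem_cons_of_mem _ hx))
    · rw [pvDD_cons, pvDD_cons, if_neg hmem, if_neg (fun hc => hmem (hm.mpr hc))]
      refine congrArg _ (ih _ _ (fun x hx => ?_))
      simp only [List.mem_cons]
      exact or_congr Iff.rfl (h x (List.mem_cons_of_mem _ hx))

theorem pvDD_append (u v : List (List (String × Option String))) (s : List (Option String × Option String × Option String)) :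
    pvDD (u ++ v) s = pvDD u s ++ pvDD v (u.map pvRawKey ++ s) := by
  induction u generalizing s with
  | nil => simp [pvDD_nil]
  | cons m u' ih =>
    by_cases hmem : pvRawKey m ∈ s
    · rw [List.cons_append, pvDD_cons, pvDD_cons, if_pos hmem, if_pos hmem, ih]
      refine congrArg _ (pvDD_congr _ _ _ (fun x _ => ?_))
      simp only [List.map_cons, List.cons_append, List.mem_cons]
      constructor
      · exact Or.inr
      · rintro (h | h)
        · rw [h]; exact List.mem_append_right _ hmem
        · exact h
    · rw [List.cons_append, pvDD_cons, pvDD_cons, if_neg hmem, if_neg hmem, ih, List.cons_append]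
      refine congrArg _ (congrArg _ (pvDD_congr _ _ _ (fun x _ => ?_)))
      simp only [List.map_cons, List.mem_append, List.mem_cons]
      tauto

theorem pvDD_subset {l : List (List (String × Option String))} {s} {m} (h : m ∈ pvDD l s) : m ∈ l := by
  induction l generalizing s with
  | nil => rw [pvDD_nil] at h; cases h
  | cons x t ih =>
    rw [pvDD_cons] at h
    split at h
    · exact List.mem_cons_of_mem _ (ih h)
    · rcases List.mem_cons.mp h with h | h
      · exact h ▸ List.mem_cons_self ..
      · exact List.mem_cons_of_mem _ (ih h)

-- A's scan-with-set loop computes pvDD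
theorem pvFoldA (l : List (List (String × Option String)))
    (seen : List (Option String × Option String × Option String)) (res : List (List (String × Option String))) :
    (l.foldl
      (fun (st : PySem.Set (Option String × Option String × Option String) × List (List (String × Option String))) msg =>
        if PySem.Set.contains st.1 (pvRawKey msg) then st
        else (PySem.Set.add st.1 (pvRawKey msg), st.2 ++ [msg]))
      (seen, res)).2 = res ++ pvDD l seen := by
  induction l generalizing seen res with
  | nil => simp [pvDD_nil]
  | cons m t ih =>
    rw [List.foldl_cons]
    by_cases h : pvRawKey m ∈ seen
    · have hcond : PySem.Set.contains seen (pvRawKey m) = true := List.contains_iff_mem.mpr h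
      rw [if_pos hcond, pvDD_cons, if_pos h]
      exact ih seen res
    · have hncond : ¬ (PySem.Set.contains seen (pvRawKey m) = true) :=
        fun hx => h (List.contains_iff_mem.mp hx)
      have hadd : PySem.Set.add seen (pvRawKey m) = seen ++ [pvRawKey m] := by
        unfold PySem.Set.add
        rw [if_neg hncond]
      rw [if_neg hncond, hadd, pvDD_cons, if_neg h, ih,
        pvDD_congr t (seen ++ [pvRawKey m]) (pvRawKey m :: seen)
          (fun x _ => by simp [List.mem_append, or_comm]),
        List.append_assoc, List.singleton_append]

-- filtering out a key is the same as marking it seen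
theorem pvDD_filter (t : List (List (String × Option String)))
    (k : Option String × Option String × Option String)
    (s : List (Option String × Option String × Option String)) :
    pvDD (t.filter (fun m => decide (pvRawKey m ≠ k))) s = pvDD t (k :: s) := by
  induction t generalizing s with
  | nil => simp [pvDD_nil]
  | cons m t ih =>
    by_cases hk : pvRawKey m = k
    · have h1 : List.filter (fun m => decide (pvRawKey m ≠ k)) (m :: t)
          = List.filter (fun m => decide (pvRawKey m ≠ k)) t := by
        simp [hk]
      rw [h1, ih, pvDD_cons, if_pos (by simp [hk])]
    · have h1 : List.filter (fun m => decide (pvRawKey m ≠ k)) (m :: t)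
          = m :: List.filter (fun m => decide (pvRawKey m ≠ k)) t := by
        simp [hk]
      rw [h1, pvDD_cons, pvDD_cons]
      by_cases hs : pvRawKey m ∈ s
      · rw [if_pos hs, if_pos (by simp [hs]), ih]
      · rw [if_neg hs, if_neg (by simp [hk, hs]), ih,
          pvDD_congr t (k :: pvRawKey m :: s) (pvRawKey m :: k :: s)
            (fun x _ => by simp [List.mem_cons]; tauto)]

-- B's worklist loop computes pvDD with no keys seen
theorem pvWorklist_eq_pvDD_aux (n : Nat) : ∀ remaining : List (List (String × Option String)),
    remaining.length ≤ n → ∀ result, pvWorklist result remaining = result ++ pvDD remaining [] := by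
  induction n with
  | zero =>
    intro rem h result
    rw [List.length_eq_zero_iff.mp (Nat.le_zero.mp h), pvWorklist.eq_def]
    simp [pvDD_nil]
  | succ n ih =>
    intro rem h result
    cases rem with
    | nil => rw [pvWorklist.eq_def]; simp [pvDD_nil]
    | cons first rest =>
      have hlen : (rest.filter (fun m => decide (pvRawKey m ≠ pvRawKey first))).length ≤ n :=
        le_trans (List.length_filter_le _ _) (Nat.lt_succ_iff.mp (Nat.lt_of_lt_of_le (by simp) h))
      rw [pvWorklist.eq_def]
      show pvWorklist (result ++ [first]) (rest.filter (fun m => decide (pvRawKey m ≠ pvRawKey first)))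
          = result ++ pvDD (first :: rest) []
      rw [ih _ hlen, pvDD_cons, if_neg (List.not_mem_nil), pvDD_filter,
        List.append_assoc, List.singleton_append]

theorem pvWorklist_eq_pvDD (remaining : List (List (String × Option String))) (result : List (List (String × Option String))) :
    pvWorklist result remaining = result ++ pvDD remaining [] :=
  pvWorklist_eq_pvDD_aux remaining.length remaining le_rfl result

-- structure of one stable insertion into a sorted list
theorem pvInsert_split (x : List (String × Option String)) (ys : List (List (String × Option String)))
    (hp : ys.Pairwise (fun a b => pvSortKey a ≤ pvSortKey b)) :
    ∃ u v, ys = u ++ v ∧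
      PySem.List.insertBy (fun a b => decide (pvSortKey a < pvSortKey b)) x ys = u ++ x :: v ∧
      (∀ y ∈ u, ¬ pvSortKey x < pvSortKey y) ∧ (∀ y ∈ v, pvSortKey x < pvSortKey y) := by
  induction ys with
  | nil => exact ⟨[], [], rfl, rfl, by simp, by simp⟩
  | cons y t ih =>
    rcases List.pairwise_cons.mp hp with ⟨hy, ht⟩
    by_cases hlt : pvSortKey x < pvSortKey y
    · refine ⟨[], y :: t, rfl, ?_, by simp, ?_⟩
      · simp [PySem.List.insertBy, hlt]
      · intro z hz
        rcases List.mem_cons.mp hz with h | h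
        · exact h ▸ hlt
        · exact lt_of_lt_of_le hlt (hy z h)
    · obtain ⟨u, v, h1, h2, h3, h4⟩ := ih ht
      refine ⟨y :: u, v, by rw [h1, List.cons_append], ?_, ?_, h4⟩
      · simp only [PySem.List.insertBy, decide_eq_true_eq, if_neg hlt, h2, List.cons_append]
      · intro z hz
        rcases List.mem_cons.mp hz with h | h
        · exact h ▸ hlt
        · exact h3 z h

theorem pvInsertBy_append (x : List (String × Option String)) (p q : List (List (String × Option String)))
    (hp : ∀ y ∈ p, ¬ pvSortKey x < pvSortKey y) (hq : ∀ y ∈ q, pvSortKey x < pvSortKey y) :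
    PySem.List.insertBy (fun a b => decide (pvSortKey a < pvSortKey b)) x (p ++ q) = p ++ x :: q := by
  induction p with
  | nil =>
    cases q with
    | nil => rfl
    | cons z t =>
      simp [PySem.List.insertBy, hq z (List.mem_cons_self ..)]
  | cons y p' ih =>
    simp only [List.cons_append, PySem.List.insertBy, decide_eq_true_eq,
      if_neg (hp y (List.mem_cons_self ..)),
      ih (fun z hz => hp z (List.mem_cons_of_mem _ hz)), List.cons_append]

theorem pvMain (l : List (List (String × Option String))) :
    pvDD (PySem.List.sorted l pvSortKey) [] = PySem.List.sorted (pvDD l []) pvSortKey := by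
  induction l using List.reverseRecOn with
  | nil =>
    have h0 : PySem.List.sorted ([] : List (List (String × Option String))) pvSortKey = [] := by
      rw [PySem.List.sorted_eq_foldl_insertBy]; rfl
    rw [h0, pvDD_nil, h0]
  | append_singleton l' x ih =>
    have hS : PySem.List.sorted (l' ++ [x]) pvSortKey
        = PySem.List.insertBy (fun a b => decide (pvSortKey a < pvSortKey b)) x (PySem.List.sorted l' pvSortKey) := by
      rw [PySem.List.sorted_eq_foldl_insertBy, PySem.List.sorted_eq_foldl_insertBy,
        List.foldl_append, List.foldl_cons, List.foldl_nil]
    have hsame : PySem.List.sorted l' pvSortKey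
        = @PySem.List.sorted _ _ List.instLinearOrder.toLT LinearOrder.toDecidableLT l' pvSortKey false := by
      congr 1
    have hpair : (PySem.List.sorted l' pvSortKey).Pairwise (fun a b => pvSortKey a ≤ pvSortKey b) := by
      rw [hsame]; exact PySem.List.sorted_pairwise l' pvSortKey
    obtain ⟨u, v, hsplit, hins, hu, hv⟩ := pvInsert_split x (PySem.List.sorted l' pvSortKey) hpair
    have hperm : (PySem.List.sorted l' pvSortKey).Perm l' := PySem.List.sorted_perm l' pvSortKey false
    have hddx : pvDD (l' ++ [x]) [] = pvDD l' [] ++ pvDD [x] (l'.map pvRawKey) := by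
      rw [pvDD_append, List.append_nil]
    by_cases hk : pvRawKey x ∈ l'.map pvRawKey
    · -- duplicate raw key: x is dropped on both sides
      obtain ⟨y, hyl, hyk⟩ := List.mem_map.mp hk
      have hyS : y ∈ PySem.List.sorted l' pvSortKey := hperm.mem_iff.mpr hyl
      have hyu : y ∈ u := by
        rcases List.mem_append.mp (hsplit ▸ hyS) with h | h
        · exact h
        · exact absurd (hv y h) (by rw [pvSortKey_eq_of_rawKey_eq hyk.symm]; exact lt_irrefl _)
      have hxku : pvRawKey x ∈ u.map pvRawKey ++ ([] : List _) := by
        rw [List.append_nil]; exact List.mem_map.mpr ⟨y, hyu, hyk⟩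
      rw [hddx, pvDD_cons, if_pos hk, pvDD_nil, List.append_nil, ← ih,
        hS, hins, pvDD_append, pvDD_cons, if_pos hxku, hsplit, pvDD_append]
    · -- fresh raw key: x survives on both sides, at the same place
      have hfresh : ∀ z ∈ PySem.List.sorted l' pvSortKey, pvRawKey z ≠ pvRawKey x := by
        intro z hz hc
        exact hk (hc ▸ List.mem_map.mpr ⟨z, hperm.mem_iff.mp hz, rfl⟩)
      have hxku : pvRawKey x ∉ u.map pvRawKey ++ ([] : List _) := by
        rw [List.append_nil]
        intro hc
        obtain ⟨z, hz, hzk⟩ := List.mem_map.mp hc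
        exact hfresh z (hsplit ▸ List.mem_append.mpr (Or.inl hz)) hzk
      have hvcong : pvDD v (pvRawKey x :: (u.map pvRawKey ++ [])) = pvDD v (u.map pvRawKey ++ []) := by
        refine pvDD_congr _ _ _ (fun m hm => ?_)
        have hne : pvRawKey m ≠ pvRawKey x :=
          hfresh m (hsplit ▸ List.mem_append.mpr (Or.inr hm))
        simp [List.mem_cons, hne]
      have hLHS : pvDD (PySem.List.sorted (l' ++ [x]) pvSortKey) []
          = pvDD u [] ++ x :: pvDD v (u.map pvRawKey ++ []) := by
        rw [hS, hins, pvDD_append, pvDD_cons, if_neg hxku, hvcong]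
      rw [hLHS, hddx, pvDD_cons, if_neg hk, pvDD_nil, List.append_nil,
        PySem.List.sorted_eq_foldl_insertBy, List.foldl_append,
        ← PySem.List.sorted_eq_foldl_insertBy, List.foldl_cons, List.foldl_nil, ← ih,
        hsplit, pvDD_append]
      simp only [List.append_nil]
      exact (pvInsertBy_append x (pvDD u []) (pvDD v (u.map pvRawKey))
        (fun y hy => hu y (pvDD_subset hy))
        (fun y hy => hv y (pvDD_subset hy))).symm

-- ===== VERDICT (by name: the statement is the Claim_ definition above) =====
theorem dedupe_messages_py_spec : Claim_equal_dedupe_messages_py := by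
  intro messages _
  show dedupe_messages_py messages = dedupe_messages_py_alt messages
  unfold dedupe_messages_py dedupe_messages_py_alt
  rw [pvFoldA, pvWorklist_eq_pvDD, List.nil_append]
  simpa [PySem.Set.empty] using pvMain messages
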